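-- pv_equiv track=rewrite | github.com/KevinZhou92/LeetCode_Topics_2024 | Binary Search/Minimum Size Subarray Sum.py | validSum
-- ===== SOURCE A (Python) =====
-- def validSum(nums, size, target):
--     sumValue = 0
--     for r in range(0, len(nums)):
--         if r < size:
--             sumValue += nums[r]
--         else:
--             sumValue = sumValue - nums[r - size] + nums[r]
--
--         if sumValue >= target:
--             return True
--
--     return False
-- ===== SOURCE B (Python) =====
-- def validSum(nums, size, target):
--     prefix = [0]
--     s = 0
--     for x in nums:
--         s += x
--         prefix.append(s)
--     for r in range(len(nums)):
--         start = max(0, r - size + 1)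
--         if prefix[r + 1] - prefix[start] >= target:
--             return True
--     return False
-- ===== Notes on version B (the rewrite author's own statement) =====
-- stated objective: alternative
-- what changed: Replaces A's running sliding-window accumulator with a precomputed prefix-sum array queried per endpoint (window sum = P[r+1]-P[max(0,r-size+1)]).
-- outside the precondition, e.g. on validSum([3, -10, 0], -1, 12): A returns True, B raises IndexError
import Mathlib
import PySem

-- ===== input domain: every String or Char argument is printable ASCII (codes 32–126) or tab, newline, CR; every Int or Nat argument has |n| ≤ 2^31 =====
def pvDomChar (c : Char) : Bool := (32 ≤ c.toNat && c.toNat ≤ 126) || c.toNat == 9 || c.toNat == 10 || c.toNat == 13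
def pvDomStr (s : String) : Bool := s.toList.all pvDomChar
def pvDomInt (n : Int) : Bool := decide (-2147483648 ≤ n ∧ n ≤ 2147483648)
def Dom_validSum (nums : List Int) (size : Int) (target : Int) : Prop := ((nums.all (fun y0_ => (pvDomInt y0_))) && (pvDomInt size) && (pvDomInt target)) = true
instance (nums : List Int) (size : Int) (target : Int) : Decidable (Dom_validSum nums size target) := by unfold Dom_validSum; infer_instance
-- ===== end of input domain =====

-- B replaces A's running sliding-window accumulator with a pfx-sum array queried per
-- endpoint (alternative decomposition, same O(n) cost).

-- ===== PORT A =====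
-- for-loop with early return, ported as structural recursion over range(0, len(nums));
-- out-of-range indexing (only reachable for size < 0, excluded by Pre_) defaults via .getD 0
def validSumLoop (nums : List Int) (size target : Int) : List Int → Int → Bool
  | [], _ => false
  | r :: rest, sumValue =>
    let sumValue :=
      if r < size then sumValue + (PySem.List.pyGet? nums r).getD 0
      else sumValue - (PySem.List.pyGet? nums (r - size)).getD 0 + (PySem.List.pyGet? nums r).getD 0
    if sumValue ≥ target then true else validSumLoop nums size target rest sumValue

def validSum (nums : List Int) (size : Int) (target : Int) : Bool :=
  validSumLoop nums size target (PySem.List.pyRange 0 nums.length 1) 0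

-- ===== PORT B =====
-- build the pfx-sum list by a fold carrying (pfx, s), then scan endpoints
def validSumAltLoop (pfx : List Int) (size target : Int) : List Int → Bool
  | [] => false
  | r :: rest =>
    let start := max 0 (r - size + 1)
    if (PySem.List.pyGet? pfx (r + 1)).getD 0 - (PySem.List.pyGet? pfx start).getD 0 ≥ target
    then true else validSumAltLoop pfx size target rest

def validSum_alt (nums : List Int) (size : Int) (target : Int) : Bool :=
  let ps := nums.foldl (fun (ps : List Int × Int) x => (ps.1 ++ [ps.2 + x], ps.2 + x)) ([0], 0)
  validSumAltLoop ps.1 size target (PySem.List.pyRange 0 nums.length 1)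

-- ===== PRECONDITION & SPEC =====
-- Pre_ excludes negative window sizes: there A's index r-size can run past the end
-- (IndexError), and where A does return the value is an accidental cumulative quantity.
def Pre_validSum (nums : List Int) (size : Int) (target : Int) : Prop := 0 ≤ size
instance (nums : List Int) (size : Int) (target : Int) : Decidable (Pre_validSum nums size target) := by unfold Pre_validSum; infer_instance
def pvWitness_validSum : List Int × Int × Int := ([2, 1, 3], 2, 4)

def Spec_validSum (nums : List Int) (size : Int) (target : Int) (out : Bool) : Prop := out = validSum_alt nums size target
instance (nums : List Int) (size : Int) (target : Int) (out : Bool) : Decidable (Spec_validSum nums size target out) := by unfold Spec_validSum; infer_instance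

-- ===== CLAIM (what is proved, stated in full; the proofs are below) =====
def Claim_equal_validSum : Prop := ∀ (nums : List Int) (size : Int) (target : Int), Dom_validSum nums size target → Pre_validSum nums size target → Spec_validSum nums size target (validSum nums size target)

-- ===== LEMMAS AND PROOFS =====

-- pfx sum of the first k elements
def pvS (nums : List Int) (k : Nat) : Int := (nums.take k).sum

-- the tail of the pfx list built by B's fold
def pvTail (s : Int) : List Int → List Int
  | [] => []
  | x :: xs => (s + x) :: pvTail (s + x) xs

theorem pvFold_eq (nums : List Int) (p : List Int) (s : Int) :
    (nums.foldl (fun (ps : List Int × Int) x => (ps.1 ++ [ps.2 + x], ps.2 + x)) (p, s)).1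
      = p ++ pvTail s nums := by
  induction nums generalizing p s with
  | nil => simp [pvTail]
  | cons x xs ih => simp [List.foldl, pvTail, ih]

theorem pvTail_get? (nums : List Int) (s : Int) (k : Nat) (hk : k < nums.length) :
    (pvTail s nums)[k]? = some (s + pvS nums (k + 1)) := by
  induction nums generalizing s k with
  | nil => simp at hk
  | cons x xs ih =>
    cases k with
    | zero => simp [pvTail, pvS]
    | succ k =>
      simp only [pvTail, List.getElem?_cons_succ]
      rw [ih (s + x) k (by simpa using hk)]
      simp [pvS, add_assoc]

theorem pvPrefix_get? (nums : List Int) (k : Nat) (hk : k ≤ nums.length) :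
    (0 :: pvTail 0 nums)[k]? = some (pvS nums k) := by
  cases k with
  | zero => simp [pvS]
  | succ k =>
    simp only [List.getElem?_cons_succ]
    rw [pvTail_get? nums 0 k (by omega)]
    simp

theorem pvS_succ (nums : List Int) (k : Nat) (hk : k < nums.length) :
    pvS nums (k + 1) = pvS nums k + nums[k] := by
  unfold pvS
  rw [List.take_add_one, List.sum_append]
  simp [List.getElem?_eq_getElem hk]

-- one step of A's accumulator update, expressed through prefix sums
theorem pvStep (nums : List Int) (size : Int) (hs : 0 ≤ size) (i : Nat) (hi : i < nums.length) :
    (if (i : Int) < size then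
        (pvS nums i - pvS nums (max 0 ((i : Int) - size)).toNat) + (PySem.List.pyGet? nums i).getD 0
      else
        (pvS nums i - pvS nums (max 0 ((i : Int) - size)).toNat)
          - (PySem.List.pyGet? nums ((i : Int) - size)).getD 0 + (PySem.List.pyGet? nums i).getD 0)
      = pvS nums (i + 1) - pvS nums (max 0 ((i : Int) + 1 - size)).toNat := by
  simp only [PySem.List.pyGet?_natCast, List.getElem?_eq_getElem hi, Option.getD_some]
  split_ifs with h
  · have h1 : max 0 ((i : Int) - size) = 0 := by omega
    have h2 : max 0 ((i : Int) + 1 - size) = 0 := by omega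
    rw [h1, h2, pvS_succ nums i hi]
    ring
  · have hj : ((i : Int) - size) = (((i : Int) - size).toNat : Int) := by omega
    have hjlt : ((i : Int) - size).toNat < nums.length := by omega
    have h1 : (max 0 ((i : Int) - size)).toNat = ((i : Int) - size).toNat := by omega
    have h2 : (max 0 ((i : Int) + 1 - size)).toNat = ((i : Int) - size).toNat + 1 := by omega
    rw [h1, h2, hj, PySem.List.pyGet?_natCast, List.getElem?_eq_getElem hjlt]
    simp only [Int.toNat_natCast, Option.getD_some]
    rw [pvS_succ nums i hi, pvS_succ nums _ hjlt]
    ring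
-- pyGet? of the prefix list at the two endpoints B queries
theorem pvPfxHigh (nums : List Int) (i : Nat) (hi : i < nums.length) :
    (PySem.List.pyGet? (0 :: pvTail 0 nums) ((i : Int) + 1)).getD 0 = pvS nums (i + 1) := by
  have : ((i : Int) + 1) = ((i + 1 : Nat) : Int) := by push_cast; ring
  rw [this, PySem.List.pyGet?_natCast, pvPrefix_get? nums (i + 1) (by omega)]
  rfl
theorem pvPfxLow (nums : List Int) (size : Int) (hs : 0 ≤ size) (i : Nat) (hi : i < nums.length) :
    (PySem.List.pyGet? (0 :: pvTail 0 nums) (max 0 ((i : Int) - size + 1))).getD 0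
      = pvS nums (max 0 ((i : Int) + 1 - size)).toNat := by
  have h0 : (0 : Int) ≤ max 0 ((i : Int) - size + 1) := by omega
  have heq : max 0 ((i : Int) - size + 1) = ((max 0 ((i : Int) + 1 - size)).toNat : Int) := by omega
  have hle : (max 0 ((i : Int) + 1 - size)).toNat ≤ nums.length := by omega
  rw [heq, PySem.List.pyGet?_natCast, pvPrefix_get? nums _ hle]
  rfl

-- A's sumValue before processing index i equals P i - P (max 0 (i - size)).
theorem pv_loops_eq (nums : List Int) (size target : Int) (hs : 0 ≤ size) :
    ∀ (k i : Nat), nums.length - i = k →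
    validSumLoop nums size target (PySem.List.pyRange i nums.length 1)
        (pvS nums i - pvS nums (max 0 ((i : Int) - size)).toNat)
      = validSumAltLoop (0 :: pvTail 0 nums) size target
          (PySem.List.pyRange i nums.length 1) := by
  intro k
  induction k with
  | zero =>
    intro i hk
    rw [PySem.List.pyRange_one_eq_nil (by exact_mod_cast Nat.le_of_sub_eq_zero hk)]
    rfl
  | succ n ih =>
    intro i hk
    have hi : i < nums.length := by omega
    rw [PySem.List.pyRange_one_cons (by exact_mod_cast hi)]
    simp only [validSumLoop, validSumAltLoop]
    rw [pvStep nums size hs i hi, pvPfxHigh nums i hi, pvPfxLow nums size hs i hi]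
    by_cases hc : pvS nums (i + 1) - pvS nums (max 0 ((i : Int) + 1 - size)).toNat ≥ target
    · simp [hc]
    · simp only [hc, if_false]
      have hcast : ((i : Int) + 1) = (((i + 1 : Nat)) : Int) := by push_cast; ring
      rw [hcast]
      exact ih (i + 1) (by omega)

-- ===== VERDICT (by name: the statement is the Claim_ definition above) =====
theorem validSum_spec : Claim_equal_validSum := by
  intro nums size target _ hpre
  unfold Spec_validSum validSum validSum_alt
  have hs : 0 ≤ size := hpre
  simp only [pvFold_eq]
  have h := pv_loops_eq nums size target hs (nums.length - 0) 0 rfl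
  have h0 : (max 0 (((0 : Nat) : Int) - size)).toNat = 0 := by omega
  rw [h0] at h
  simpa [pvS] using h
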